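-- pv_equiv track=rewrite | github.com/Aioloszhao1993/python-practice | mianshi.py | sum_time
-- ===== SOURCE A (Python) =====
-- def sum_time(time_list):
--     sum = 0
--     num_list = []
--     for i in range(len(time_list)):
--         num1 = time_list[i]
--         for num2 in time_list[i + 2:]:
--             if sum < num1 + num2:
--                 sum = num1 + num2
--         num_list.append(sum)
--         sum = 0
--     max_num = 0
--     for num in num_list:
--         if max_num < num:
--             max_num = num
--     return max_num
-- ===== SOURCE B (Python) =====
-- def sum_time(time_list):
--     # One backward pass keeping the running max of elements at distance >= 2.
--     best = 0
--     suff = None   # max of elements two or more positions to the right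
--     prev = None   # element immediately to the right
--     for x in reversed(time_list):
--         if suff is not None and x + suff > best:
--             best = x + suff
--         if prev is not None:
--             suff = prev if suff is None or prev > suff else suff
--         prev = x
--     return best
-- ===== Notes on version B (the rewrite author's own statement) =====
-- stated objective: faster
-- what changed: Replaced the quadratic scan of all index pairs (i, j>=i+2) by a single backward pass that maintains the running maximum of elements at distance >= 2, combining each element with that suffix maximum.
import Mathlib
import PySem

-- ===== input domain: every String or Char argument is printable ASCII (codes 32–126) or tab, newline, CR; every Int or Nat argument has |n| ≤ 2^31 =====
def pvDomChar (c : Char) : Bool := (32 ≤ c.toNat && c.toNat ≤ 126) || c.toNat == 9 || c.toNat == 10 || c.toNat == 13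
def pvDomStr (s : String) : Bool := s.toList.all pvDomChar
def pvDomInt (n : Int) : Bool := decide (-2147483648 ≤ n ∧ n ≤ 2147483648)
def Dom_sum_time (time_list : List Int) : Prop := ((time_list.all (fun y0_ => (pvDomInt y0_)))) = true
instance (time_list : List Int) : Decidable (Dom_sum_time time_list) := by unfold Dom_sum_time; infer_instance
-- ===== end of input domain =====

-- B replaces A's quadratic scan over all index pairs (i, j ≥ i+2) by one backward
-- pass keeping the running maximum of elements at distance ≥ 2 (objective: faster).

-- ===== PORT A =====
-- time_list[i] with i ∈ range(len(time_list)) always succeeds, so getD i 0 is exact;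
-- time_list[i+2:] with i+2 ≥ 0 is exactly List.drop (i+2).
def sum_time (time_list : List Int) : Int :=
  let num_list := (List.range time_list.length).foldl
    (fun nl i =>
      let num1 := time_list.getD i 0
      let s := (time_list.drop (i + 2)).foldl
        (fun s num2 => if s < num1 + num2 then num1 + num2 else s) 0
      nl ++ [s]) []
  num_list.foldl (fun m num => if m < num then num else m) 0

-- ===== PORT B =====
-- state = (best, suff, prev); 'for x in reversed(time_list)' is a foldl over the reverse.
def sum_time_altStep (st : Int × Option Int × Option Int) (x : Int) :
    Int × Option Int × Option Int :=
  let best := st.1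
  let suff := st.2.1
  let prev := st.2.2
  let best := match suff with
    | some m => if x + m > best then x + m else best
    | none => best
  let suff := match prev with
    | some p => match suff with
      | none => some p
      | some m => if p > m then some p else some m
    | none => suff
  (best, suff, some x)

def sum_time_alt (time_list : List Int) : Int :=
  (time_list.reverse.foldl sum_time_altStep (0, none, none)).1

-- ===== PRECONDITION & SPEC =====
def Spec_sum_time (time_list : List Int) (out : Int) : Prop := out = sum_time_alt time_list
instance (time_list : List Int) (out : Int) : Decidable (Spec_sum_time time_list out) := by unfold Spec_sum_time; infer_instance

-- ===== CLAIM (what is proved, stated in full; the proofs are below) =====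
def Claim_equal_sum_time : Prop := ∀ (time_list : List Int), Dom_sum_time time_list → Spec_sum_time time_list (sum_time time_list)

-- ===== LEMMAS AND PROOFS =====

-- common recursive characterisation of both programs
def pvInner (x : Int) (xs : List Int) : Int :=
  (xs.drop 1).foldl (fun s num2 => if s < x + num2 then x + num2 else s) 0

def pvSpec : List Int → Int
  | [] => 0
  | x :: xs => max (pvInner x xs) (pvSpec xs)

def pvSMax : List Int → Option Int
  | [] => none
  | y :: ys => some (match pvSMax ys with
      | none => y
      | some m => if y > m then y else m)

lemma pvSpec_nonneg : ∀ l : List Int, 0 ≤ pvSpec l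
  | [] => le_refl 0
  | _ :: xs => le_trans (pvSpec_nonneg xs) (le_max_right _ _)

lemma if_lt_eq_max (a b : Int) : (if a < b then b else a) = max a b := by
  rcases lt_or_ge a b with h | h
  · rw [if_pos h, max_eq_right h.le]
  · rw [if_neg (not_lt.mpr h), max_eq_left h]

lemma foldl_step_eq (x : Int) : ∀ (l : List Int) (c : Int),
    l.foldl (fun s num2 => if s < x + num2 then x + num2 else s) c =
      (match pvSMax l with
        | none => c
        | some m => max c (x + m)) := by
  intro l
  induction l with
  | nil => intro c; rfl
  | cons y ys ih =>
    intro c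
    simp only [List.foldl_cons, ih, pvSMax]
    cases h : pvSMax ys with
    | none => simp only [if_lt_eq_max]
    | some m =>
      simp only [gt_iff_lt, if_lt_eq_max]
      rw [← max_add_add_left, max_assoc, max_comm (x + y) (x + m)]


lemma pvInner_eq (x : Int) (xs : List Int) :
    pvInner x xs = (match pvSMax (xs.drop 1) with
      | none => 0
      | some m => max 0 (x + m)) := by
  simpa [pvInner] using foldl_step_eq x (xs.drop 1) 0

-- B's state invariant
lemma pvSMax_cons_eq (y : Int) (ys : List Int) :
    (match pvSMax ys with
      | none => some y
      | some m => if y > m then some y else some m) = pvSMax (y :: ys) := by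
  cases hz : pvSMax ys with
  | none => simp [pvSMax, hz]
  | some m => simp only [pvSMax, hz]; split_ifs <;> rfl

-- B's state invariant
lemma alt_state : ∀ l : List Int,
    l.reverse.foldl sum_time_altStep (0, none, none) =
      (pvSpec l, pvSMax (l.drop 1), l.head?) := by
  intro l
  rw [List.foldl_reverse]
  induction l with
  | nil => rfl
  | cons x xs ih =>
    rw [List.foldr_cons, ih]
    cases xs with
    | nil =>
      simp [sum_time_altStep, pvSpec, pvInner, pvSMax]
    | cons y ys =>
      simp only [sum_time_altStep, List.head?]
      refine Prod.ext ?_ (Prod.ext ?_ rfl)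
      · -- best component
        have hnn := pvSpec_nonneg (y :: ys)
        show (match pvSMax ((y :: ys).drop 1) with
          | some m => if x + m > pvSpec (y :: ys) then x + m else pvSpec (y :: ys)
          | none => pvSpec (y :: ys)) = pvSpec (x :: y :: ys)
        rw [show pvSpec (x :: y :: ys) = max (pvInner x (y :: ys)) (pvSpec (y :: ys)) from rfl]
        rw [pvInner_eq]
        cases h : pvSMax ((y :: ys).drop 1) with
        | none => simp only []; rw [max_eq_right hnn]
        | some m =>
          simp only [gt_iff_lt, if_lt_eq_max]
          rw [max_comm (0 : Int) (x + m), max_assoc, max_eq_right hnn, max_comm]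
      · -- suff component
        show (match (y :: ys).head? with
          | some p => match pvSMax ((y :: ys).drop 1) with
            | none => some p
            | some m => if p > m then some p else some m
          | none => pvSMax ((y :: ys).drop 1)) = pvSMax ((x :: y :: ys).drop 1)
        simp only [List.head?, List.drop_succ_cons, List.drop_zero]
        exact pvSMax_cons_eq y ys

lemma alt_eq_spec (l : List Int) : sum_time_alt l = pvSpec l := by
  unfold sum_time_alt
  rw [alt_state]

-- A-side lemmas
lemma foldl_append_map (g : Nat → Int) : ∀ (r : List Nat) (acc : List Int),
    r.foldl (fun nl i => nl ++ [g i]) acc = acc ++ r.map g := by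
  intro r
  induction r with
  | nil => intro acc; simp
  | cons i is ih => intro acc; simp [ih]

lemma foldl_max_shift : ∀ (l : List Int) (c d : Int),
    l.foldl max (max c d) = max c (l.foldl max d) := by
  intro l
  induction l with
  | nil => intro c d; rfl
  | cons y ys ih =>
    intro c d
    simp only [List.foldl_cons, max_assoc, ih]

lemma foldl_if_eq_max : ∀ (l : List Int) (c : Int),
    l.foldl (fun m num => if m < num then num else m) c = l.foldl max c := by
  intro l
  induction l with
  | nil => intro c; rfl
  | cons y ys ih =>
    intro c
    simp only [List.foldl_cons, ih]
    congr 1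
    rcases lt_or_ge c y with h | h
    · simp [h, le_of_lt h]
    · simp [not_lt.mpr h, max_def]; omega

lemma a_eq_spec : ∀ l : List Int, sum_time l = pvSpec l := by
  intro l
  induction l with
  | nil => rfl
  | cons x xs ih =>
    show ((List.range (x :: xs).length).foldl
        (fun nl i => nl ++ [(xs.drop (i + 1)).foldl
          (fun s num2 => if s < (x :: xs).getD i 0 + num2 then (x :: xs).getD i 0 + num2 else s) 0]) []).foldl
        (fun m num => if m < num then num else m) 0 = pvSpec (x :: xs)
    rw [foldl_append_map]
    have hmap : (List.range (x :: xs).length).map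
        (fun i => (xs.drop (i + 1)).foldl
          (fun s num2 => if s < (x :: xs).getD i 0 + num2 then (x :: xs).getD i 0 + num2 else s) 0)
        = pvInner x xs ::
          (List.range xs.length).map
            (fun i => (xs.drop (i + 2)).foldl
              (fun s num2 => if s < xs.getD i 0 + num2 then xs.getD i 0 + num2 else s) 0) := by
      rw [show (x :: xs).length = xs.length + 1 from rfl, List.range_succ_eq_map]
      simp only [List.map_cons, List.map_map]
      constructor
    rw [hmap]
    have ha : sum_time xs = ((List.range xs.length).map
        (fun i => (xs.drop (i + 2)).foldl
          (fun s num2 => if s < xs.getD i 0 + num2 then xs.getD i 0 + num2 else s) 0)).foldl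
        (fun m num => if m < num then num else m) 0 := by
      show sum_time xs = _
      unfold sum_time
      rw [foldl_append_map]
      simp
    simp only [List.nil_append, foldl_if_eq_max] at ha ⊢
    rw [List.foldl_cons, show max (0:Int) (pvInner x xs) = max (pvInner x xs) 0 from max_comm _ _,
      foldl_max_shift, ← ha, ih]
    rfl

-- ===== VERDICT (by name: the statement is the Claim_ definition above) =====
theorem sum_time_spec : Claim_equal_sum_time := by
  intro l _
  show sum_time l = sum_time_alt l
  rw [a_eq_spec, alt_eq_spec]
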